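-- pv_equiv track=rewrite | github.com/KemalOenen/decomposing-vibrations | icsel.py | not_same_central_atom
-- ===== SOURCE A (Python) =====
-- def not_same_central_atom(list_oop_angles) -> bool:
--     central_atoms = set()
--     not_same_central_atom = True
--     for oop_angle in list_oop_angles:
--         if oop_angle[0] in central_atoms:
--             not_same_central_atom = False
--             break
--         else:
--             central_atoms.add(oop_angle[0])
--     return not_same_central_atom
-- ===== SOURCE B (Python) =====
-- def not_same_central_atom(list_oop_angles) -> bool:
--     firsts = [oop_angle[0] for oop_angle in list_oop_angles]
--     return len(set(firsts)) == len(firsts)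
-- ===== Notes on version B (the rewrite author's own statement) =====
-- stated objective: simpler
-- what changed: B replaces A's incremental membership loop with flag and early break by building the full list of central atoms and comparing len(set(firsts)) with len(firsts).
import Mathlib
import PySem

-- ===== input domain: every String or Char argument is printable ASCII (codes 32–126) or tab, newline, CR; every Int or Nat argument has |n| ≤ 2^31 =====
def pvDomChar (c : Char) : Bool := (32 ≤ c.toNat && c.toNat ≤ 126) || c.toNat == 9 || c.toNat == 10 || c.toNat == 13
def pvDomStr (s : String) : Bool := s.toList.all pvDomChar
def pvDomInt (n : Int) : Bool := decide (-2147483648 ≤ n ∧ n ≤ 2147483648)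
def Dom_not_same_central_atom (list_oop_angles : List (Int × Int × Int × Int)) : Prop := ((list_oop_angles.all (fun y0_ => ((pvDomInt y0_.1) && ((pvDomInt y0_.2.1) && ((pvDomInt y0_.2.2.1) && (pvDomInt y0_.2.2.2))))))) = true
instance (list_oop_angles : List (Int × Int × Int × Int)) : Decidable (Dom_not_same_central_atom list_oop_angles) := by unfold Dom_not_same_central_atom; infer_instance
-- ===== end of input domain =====

-- B builds the full list of central atoms at once and decides by comparing len(set(firsts))
-- with len(firsts), instead of A's incremental membership loop with a flag and early break (simpler decomposition).

-- ===== PORT A =====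
-- loop 'for oop_angle in list_oop_angles' with its early break, carrying the running set
def notSameCentralLoop : List (Int × Int × Int × Int) → PySem.Set Int → Bool
  | [], _ => true
  | oop_angle :: rest, central_atoms =>
      if PySem.Set.contains central_atoms oop_angle.1 then false
      else notSameCentralLoop rest (PySem.Set.add central_atoms oop_angle.1)

def not_same_central_atom (list_oop_angles : List (Int × Int × Int × Int)) : Bool :=
  notSameCentralLoop list_oop_angles PySem.Set.empty

-- ===== PORT B =====
def not_same_central_atom_alt (list_oop_angles : List (Int × Int × Int × Int)) : Bool :=
  let firsts := list_oop_angles.map (fun oop_angle => oop_angle.1)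
  PySem.Set.len (PySem.Set.ofList firsts) == PySem.List.len firsts

-- ===== PRECONDITION & SPEC =====
def Spec_not_same_central_atom (list_oop_angles : List (Int × Int × Int × Int)) (out : Bool) : Prop := out = not_same_central_atom_alt list_oop_angles
instance (list_oop_angles : List (Int × Int × Int × Int)) (out : Bool) : Decidable (Spec_not_same_central_atom list_oop_angles out) := by unfold Spec_not_same_central_atom; infer_instance

-- ===== CLAIM =====
def Claim_equal_not_same_central_atom : Prop := ∀ (list_oop_angles : List (Int × Int × Int × Int)), Dom_not_same_central_atom list_oop_angles → Spec_not_same_central_atom list_oop_angles (not_same_central_atom list_oop_angles)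

-- ===== LEMMAS AND PROOFS =====

-- A's loop returns true iff the first components are nodup and disjoint from the carried set.
theorem notSameCentralLoop_eq_true_iff (xs : List (Int × Int × Int × Int)) (s : PySem.Set Int) :
    notSameCentralLoop xs s = true ↔
      (xs.map (fun o => o.1)).Nodup ∧ ∀ p ∈ xs, p.1 ∉ s := by
  induction xs generalizing s with
  | nil => simp [notSameCentralLoop]
  | cons a rest ih =>
    simp only [notSameCentralLoop]
    by_cases h : a.1 ∈ s
    · rw [if_pos ((PySem.Set.contains_iff s a.1).2 h)]
      exact ⟨fun hf => by simp at hf, fun ⟨_, hd⟩ => absurd h (hd a (by simp))⟩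
    · rw [if_neg (fun hc => h ((PySem.Set.contains_iff s a.1).1 hc)), ih]
      constructor
      · rintro ⟨hn, hd⟩
        refine ⟨?_, ?_⟩
        · simp only [List.map_cons, List.nodup_cons]
          refine ⟨?_, hn⟩
          intro hmem
          rcases List.mem_map.1 hmem with ⟨p, hp, hpe⟩
          exact hd p hp ((PySem.Set.mem_add s a.1 p.1).2 (Or.inr hpe))
        · intro p hp hps
          rcases List.mem_cons.1 hp with rfl | hp'
          · exact h hps
          · exact hd p hp' ((PySem.Set.mem_add s a.1 p.1).2 (Or.inl hps))
      · rintro ⟨hn, hd⟩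
        simp only [List.map_cons, List.nodup_cons] at hn
        refine ⟨hn.2, ?_⟩
        intro p hp hps
        rcases (PySem.Set.mem_add s a.1 p.1).1 hps with h1 | h1
        · exact hd p (List.mem_cons_of_mem a hp) h1
        · exact hn.1 (List.mem_map.2 ⟨p, hp, h1⟩)

theorem len_ofList_eq_iff (ys : List Int) :
    (PySem.Set.ofList ys).length = ys.length ↔ ys.Nodup := by
  constructor
  · intro h
    induction ys with
    | nil => simp
    | cons x ys ih =>
      rw [PySem.Set.ofList_cons] at h
      simp only [List.length_cons] at h
      have hle1 : ((PySem.Set.ofList ys).discard x).length ≤ (PySem.Set.ofList ys).length :=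
        List.length_filter_le _ _
      have hle2 := PySem.Set.length_ofList_le (xs := ys)
      have heq1 : ((PySem.Set.ofList ys).discard x).length = (PySem.Set.ofList ys).length := by omega
      have heq2 : (PySem.Set.ofList ys).length = ys.length := by omega
      have hall : ∀ y ∈ PySem.Set.ofList ys, (!y == x) = true :=
        List.length_filter_eq_length_iff.1 heq1
      have hx : x ∉ ys := by
        intro hx
        have := hall x ((PySem.Set.mem_ofList ys x).2 hx)
        simp at this
      exact List.nodup_cons.2 ⟨hx, ih heq2⟩
  · intro h
    rw [PySem.Set.ofList_eq_self_of_nodup ys h]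

-- ===== VERDICT =====
theorem not_same_central_atom_spec : Claim_equal_not_same_central_atom := by
  intro l _
  unfold Spec_not_same_central_atom
  unfold not_same_central_atom not_same_central_atom_alt
  have hA := notSameCentralLoop_eq_true_iff l PySem.Set.empty
  have hB := len_ofList_eq_iff (l.map (fun o => o.1))
  have hA' : notSameCentralLoop l PySem.Set.empty = true ↔ (l.map (fun o => o.1)).Nodup := by
    rw [hA]
    simp [PySem.Set.empty]
  have hB' : (PySem.Set.len (PySem.Set.ofList (l.map fun o => o.1)) ==
      PySem.List.len (l.map fun o => o.1)) = true ↔ (l.map (fun o => o.1)).Nodup := by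
    rw [beq_iff_eq, ← hB]
    simp only [PySem.Set.len, PySem.List.len]
    exact ⟨fun hh => by exact_mod_cast hh, fun hh => by exact_mod_cast hh⟩
  simp only []
  cases hv : notSameCentralLoop l PySem.Set.empty with
  | true => exact (hB'.2 (hA'.1 hv)).symm
  | false =>
    cases hw : (PySem.Set.len (PySem.Set.ofList (l.map fun o => o.1)) ==
        PySem.List.len (l.map fun o => o.1)) with
    | false => rfl
    | true =>
      rw [hA'.2 (hB'.1 hw)] at hv
      simp at hv
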